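-- pv_equiv track=rewrite | github.com/TJTP/CWS | MyHMM.py | seg_substr_b
-- ===== SOURCE A (Python) =====
-- def seg_substr_b(tags, idx):
--     if tags[idx] == 'E' or tags[idx] == 'M':
--         begin = idx - 1
--         while begin >= 0:
--             if tags[begin] == 'B':
--                 return begin
--             begin -= 1
--         return (begin + 1)
--     else:
--         return idx
-- ===== SOURCE B (Python) =====
-- def seg_substr_b(tags, idx):
--     # Different decomposition: forward scan remembering the last 'B' seen (default 0),
--     # instead of A's backward scan with early return.
--     if tags[idx] in ('E', 'M'):
--         last_b = 0
--         for i in range(idx):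
--             if tags[i] == 'B':
--                 last_b = i
--         return last_b
--     else:
--         return idx
-- ===== Notes on version B (the rewrite author's own statement) =====
-- stated objective: alternative
-- what changed: Replaced A's backward while-loop with early return by a forward scan over range(idx) that keeps the last 'B' position seen (default 0).
-- intended difference: On negative in-range idx whose (wrapped) tag is 'E' or 'M', A returns the negative idx itself because its backward scan never starts, while B returns 0, the intended default position when no preceding 'B' exists. — e.g. on seg_substr_b(["E"], -1): A returns -1, B returns 0
import Mathlib
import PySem

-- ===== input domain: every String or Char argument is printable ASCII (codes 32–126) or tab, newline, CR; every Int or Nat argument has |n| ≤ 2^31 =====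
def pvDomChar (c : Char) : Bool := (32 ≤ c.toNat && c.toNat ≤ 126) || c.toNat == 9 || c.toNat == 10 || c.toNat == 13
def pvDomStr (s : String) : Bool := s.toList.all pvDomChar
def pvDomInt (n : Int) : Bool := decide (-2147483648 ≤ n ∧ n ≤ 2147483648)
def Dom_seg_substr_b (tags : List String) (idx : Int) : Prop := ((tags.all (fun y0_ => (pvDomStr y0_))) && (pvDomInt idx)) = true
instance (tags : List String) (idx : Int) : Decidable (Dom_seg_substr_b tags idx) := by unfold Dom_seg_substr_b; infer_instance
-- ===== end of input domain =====

-- B replaces the backward early-return scan by a forward scan keeping the last 'B' seen (alternative decomposition, same cost).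

-- ===== PORT A =====
-- while begin >= 0: if tags[begin] == 'B': return begin; begin -= 1   -- then return begin + 1
-- (inside the loop 0 ≤ begin, and begin < len tags whenever the caller passes begin = idx - 1 with idx in range;
--  the 'none' case of pyGet? is Python's IndexError, unreachable under Pre_)
def segA_scan (tags : List String) (b : Int) : Int :=
  if h : 0 ≤ b then
    match PySem.List.pyGet? tags b with
    | some t => if t = "B" then b else segA_scan tags (b - 1)
    | none => 0
  else b + 1
termination_by (b + 1).toNat
decreasing_by omega

def seg_substr_b (tags : List String) (idx : Int) : Int :=
  match PySem.List.pyGet? tags idx with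
  | some t => if t = "E" ∨ t = "M" then segA_scan tags (idx - 1) else idx
  | none => 0   -- IndexError, excluded by Pre_

-- ===== PORT B =====
def seg_substr_b_alt (tags : List String) (idx : Int) : Int :=
  match PySem.List.pyGet? tags idx with
  | some t =>
    if t = "E" ∨ t = "M" then
      (PySem.List.pyRange 0 idx 1).foldl
        (fun last_b i => if PySem.List.pyGet? tags i = some "B" then i else last_b) 0
    else idx
  | none => 0   -- IndexError, excluded by Pre_

-- ===== PRECONDITION & SPEC =====
-- Pre_: exactly the inputs on which Python A returns normally (tags[idx] does not raise IndexError).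
def Pre_seg_substr_b (tags : List String) (idx : Int) : Prop :=
  -(tags.length : Int) ≤ idx ∧ idx < (tags.length : Int)
instance (tags : List String) (idx : Int) : Decidable (Pre_seg_substr_b tags idx) := by unfold Pre_seg_substr_b; infer_instance
def pvWitness_seg_substr_b : List String × Int := (["B", "M", "E"], 2)

-- On negative in-range idx whose (wrapped) tag is 'E' or 'M', A returns the negative idx itself because
-- its backward scan never starts, while B returns 0, the intended default position when no preceding 'B' exists.
def D_seg_substr_b (tags : List String) (idx : Int) : Prop :=
  idx < 0 ∧ -(tags.length : Int) ≤ idx ∧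
    (tags[(idx + tags.length).toNat]? = some "E" ∨ tags[(idx + tags.length).toNat]? = some "M")
instance (tags : List String) (idx : Int) : Decidable (D_seg_substr_b tags idx) := by unfold D_seg_substr_b; infer_instance

def Spec_seg_substr_b (tags : List String) (idx : Int) (out : Int) : Prop :=
  ¬ D_seg_substr_b tags idx → out = seg_substr_b_alt tags idx
instance (tags : List String) (idx : Int) (out : Int) : Decidable (Spec_seg_substr_b tags idx out) := by unfold Spec_seg_substr_b; infer_instance

def pvDiffWitness_seg_substr_b : List String × Int := (["E"], -1)
def pvDiffWitnessOut_seg_substr_b : Int × Int := (-1, 0)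

-- ===== CLAIM (what is proved, stated in full; the proofs are below) =====
def Claim_unchanged_seg_substr_b : Prop := ∀ (tags : List String) (idx : Int), Dom_seg_substr_b tags idx → Pre_seg_substr_b tags idx → Spec_seg_substr_b tags idx (seg_substr_b tags idx)
def Claim_changed_seg_substr_b : Prop := Dom_seg_substr_b (pvDiffWitness_seg_substr_b.1) (pvDiffWitness_seg_substr_b.2) ∧ Pre_seg_substr_b (pvDiffWitness_seg_substr_b.1) (pvDiffWitness_seg_substr_b.2) ∧ D_seg_substr_b (pvDiffWitness_seg_substr_b.1) (pvDiffWitness_seg_substr_b.2) ∧ seg_substr_b (pvDiffWitness_seg_substr_b.1) (pvDiffWitness_seg_substr_b.2) = pvDiffWitnessOut_seg_substr_b.1 ∧ seg_substr_b_alt (pvDiffWitness_seg_substr_b.1) (pvDiffWitness_seg_substr_b.2) = pvDiffWitnessOut_seg_substr_b.2 ∧ pvDiffWitnessOut_seg_substr_b.1 ≠ pvDiffWitnessOut_seg_substr_b.2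
def Claim_exact_seg_substr_b : Prop := ∀ (tags : List String) (idx : Int), Dom_seg_substr_b tags idx → Pre_seg_substr_b tags idx → D_seg_substr_b tags idx → seg_substr_b tags idx ≠ seg_substr_b_alt tags idx

-- ===== LEMMAS AND PROOFS =====

-- A's backward scan from m-1 equals B's forward fold over range(0, m), for m ≤ len tags.
theorem segA_scan_eq_fold (tags : List String) (m : Nat) (hm : m ≤ tags.length) :
    segA_scan tags ((m : Int) - 1) =
      (PySem.List.pyRange 0 (m : Int) 1).foldl
        (fun last_b i => if PySem.List.pyGet? tags i = some "B" then i else last_b) 0 := by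
  induction m with
  | zero =>
    rw [segA_scan]
    norm_num [PySem.List.pyRange_one_eq_nil]
  | succ n ih =>
    have hn : n < tags.length := by omega
    have hcast : ((n + 1 : Nat) : Int) - 1 = (n : Int) := by push_cast; omega
    have hget : PySem.List.pyGet? tags (n : Int) = some tags[n] := by
      simp [List.getElem?_eq_getElem hn]
    have hr : PySem.List.pyRange 0 ((n + 1 : Nat) : Int) 1 =
        PySem.List.pyRange 0 (n : Int) 1 ++ [(n : Int)] := by
      have := PySem.List.pyRange_one_succ_right (a := 0) (b := (n : Int)) (by positivity)
      push_cast
      simpa using this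
    rw [hcast, hr, List.foldl_append]
    conv_lhs => rw [segA_scan]
    simp only [hget, Int.natCast_nonneg, dite_true, List.foldl_cons, List.foldl_nil]
    by_cases hB : tags[n] = "B"
    · simp [hB]
    · simp [hB, ih (by omega)]

-- ===== VERDICT (by name: the statement is the Claim_ definition above) =====
theorem seg_substr_b_spec : Claim_unchanged_seg_substr_b := by
  intro tags idx hdom hpre hnd
  obtain ⟨h1, h2⟩ := hpre
  unfold seg_substr_b seg_substr_b_alt
  have hget : ∃ t, PySem.List.pyGet? tags idx = some t := by
    unfold PySem.List.pyGet? PySem.List.pyIdx?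
    by_cases h0 : 0 ≤ idx
    · rw [if_pos h0, if_pos h2]
      refine ⟨tags[idx.toNat]'(by omega), ?_⟩
      simp [List.getElem?_eq_getElem (show idx.toNat < tags.length by omega)]
    · rw [if_neg h0, if_pos h1]
      refine ⟨tags[tags.length - (-idx).toNat]'(by omega), ?_⟩
      simp [List.getElem?_eq_getElem (show tags.length - (-idx).toNat < tags.length by omega)]
  obtain ⟨t, ht⟩ := hget
  rw [ht]
  by_cases hEM : t = "E" ∨ t = "M"
  · simp only [hEM, if_true]
    -- ¬ D_ forces 0 ≤ idx here
    have hidx : 0 ≤ idx := by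
      by_contra hneg
      rw [Int.not_le] at hneg
      apply hnd
      refine ⟨hneg, h1, ?_⟩
      have : PySem.List.pyGet? tags idx = tags[(idx + tags.length).toNat]? := by
        unfold PySem.List.pyGet? PySem.List.pyIdx?
        have h0 : ¬ 0 ≤ idx := by omega
        have hix : tags.length - (-idx).toNat = (idx + tags.length).toNat := by omega
        rw [if_neg h0, if_pos (by omega : -(tags.length:Int) ≤ idx), hix]
        simp
      rw [this] at ht
      rcases hEM with h | h <;> [left; right] <;> rw [ht, h]
    obtain ⟨m, rfl⟩ : ∃ m : Nat, idx = (m : Int) := ⟨idx.toNat, by omega⟩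
    exact segA_scan_eq_fold tags m (by omega)
  · simp [hEM]

theorem seg_substr_b_tight : Claim_exact_seg_substr_b := by
  intro tags idx hdom hpre hd
  obtain ⟨hneg, hlb, hEM⟩ := hd
  have hget : PySem.List.pyGet? tags idx = tags[(idx + tags.length).toNat]? := by
    unfold PySem.List.pyGet? PySem.List.pyIdx?
    have h0 : ¬ 0 ≤ idx := by omega
    have hix : tags.length - (-idx).toNat = (idx + tags.length).toNat := by omega
    rw [if_neg h0, if_pos hlb, hix]
    simp
  -- A returns idx (the backward scan never starts), B returns 0
  have hA : seg_substr_b tags idx = idx := by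
    unfold seg_substr_b
    rw [hget]
    rcases hEM with h | h <;> rw [h] <;> simp <;>
      · rw [segA_scan, dif_neg (by omega : ¬ (0:Int) ≤ idx - 1)]; omega
  have hB : seg_substr_b_alt tags idx = 0 := by
    unfold seg_substr_b_alt
    rw [hget]
    rcases hEM with h | h <;> rw [h] <;>
      simp [PySem.List.pyRange_one_eq_nil (by omega : idx ≤ 0)]
  rw [hA, hB]
  omega

theorem seg_substr_b_changed : Claim_changed_seg_substr_b := by
  unfold Claim_changed_seg_substr_b
  refine ⟨by decide, by decide, by decide, ?_, by decide, by decide⟩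
  show seg_substr_b ["E"] (-1) = -1
  rw [show seg_substr_b ["E"] (-1) = segA_scan ["E"] (-2) from by rfl]
  rw [segA_scan]
  norm_num
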